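-- pv_equiv track=rewrite | github.com/fidemin/algorithm-problem-solving | 1118B/solution.py | make_to_left
-- ===== SOURCE A (Python) =====
-- def make_to_left(n, arr):
--     flag = True
--     ret = [-1]*n
--
--     flag_sum = 0
--     not_flag_sum = 0
--     for i in range(n-1, -1, -1):
--         if flag:
--             flag_sum += arr[i]
--             ret[i] = flag_sum
--             flag = False
--         else:
--             not_flag_sum += arr[i]
--             ret[i] = not_flag_sum
--             flag=True
--
--     return ret
-- ===== SOURCE B (Python) =====
-- def make_to_left(n, arr):
--     m = max(n, 0)
--     res = [0] * m
--     for start in (0, 1):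
--         sub = [arr[j] for j in range(start, m, 2)]
--         acc = sum(sub)
--         for k, x in enumerate(sub):
--             res[start + 2 * k] = acc
--             acc -= x
--     return res
-- ===== Notes on version B (the rewrite author's own statement) =====
-- stated objective: alternative
-- what changed: Replaces the single backward flag-toggling pass with two forward passes: for each parity it extracts the stride-2 subsequence, takes its total, and writes each suffix sum forward as total minus the running prefix.
import Mathlib
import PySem

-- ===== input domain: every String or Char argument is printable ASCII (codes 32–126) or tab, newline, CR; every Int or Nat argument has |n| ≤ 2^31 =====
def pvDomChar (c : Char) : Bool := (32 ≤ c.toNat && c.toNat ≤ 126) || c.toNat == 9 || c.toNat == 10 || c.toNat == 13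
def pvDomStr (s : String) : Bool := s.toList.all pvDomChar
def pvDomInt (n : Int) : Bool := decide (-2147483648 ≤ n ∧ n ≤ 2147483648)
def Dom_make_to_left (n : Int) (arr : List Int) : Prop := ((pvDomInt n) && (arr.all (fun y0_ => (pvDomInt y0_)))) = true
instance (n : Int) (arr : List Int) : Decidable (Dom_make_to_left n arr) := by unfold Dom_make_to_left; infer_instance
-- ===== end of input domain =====

-- B replaces A's backward flag-toggling pass by two forward per-parity passes that write
-- each suffix sum as the parity-subsequence total minus the running prefix (objective: alternative).

-- ===== PORT A =====
-- the loop body of A, as a named step function folded over range(n-1, -1, -1)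
def pvStepA (arr : List Int) (st : Bool × List Int × Int × Int) (i : Int) :
    Bool × List Int × Int × Int :=
  let (flag, ret, fs, nfs) := st
  if flag then
    let fs' := fs + PySem.List.pyGetD arr i 0
    (false, ret.set i.toNat fs', fs', nfs)
  else
    let nfs' := nfs + PySem.List.pyGetD arr i 0
    (true, ret.set i.toNat nfs', fs, nfs')

def make_to_left (n : Int) (arr : List Int) : List Int :=
  let init : Bool × List Int × Int × Int := (true, List.replicate n.toNat (-1), 0, 0)
  ((PySem.List.pyRange (n - 1) (-1) (-1)).foldl (pvStepA arr) init).2.1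

-- ===== PORT B =====
-- inner loop body of B: res[start + 2*k] = acc; acc -= x   (the index is always in range
-- in Python, so List.set is exact here)
def pvStepB (start : Int) (st : List Int × Int) (kx : Int × Int) : List Int × Int :=
  (st.1.set (start + 2 * kx.1).toNat st.2, st.2 - kx.2)

-- one pass of B's outer loop: sub = [arr[j] for j in range(start, m, 2)]; acc = sum(sub); inner loop
def pvPass (arr : List Int) (m : Int) (res : List Int) (start : Int) : List Int :=
  let sub := (PySem.List.pyRange start m 2).map (fun j => PySem.List.pyGetD arr j 0)
  ((PySem.List.enumerate sub 0).foldl (pvStepB start) (res, sub.sum)).1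

def make_to_left_alt (n : Int) (arr : List Int) : List Int :=
  let m := max n 0
  [(0 : Int), 1].foldl (pvPass arr m) (List.replicate m.toNat 0)

-- ===== PRECONDITION & SPEC =====
-- A indexes arr[i] for i = n-1..0 and raises IndexError when n exceeds len(arr); Pre_ excludes exactly that.
def Pre_make_to_left (n : Int) (arr : List Int) : Prop := n ≤ (arr.length : Int)
instance (n : Int) (arr : List Int) : Decidable (Pre_make_to_left n arr) := by
  unfold Pre_make_to_left; infer_instance

def pvWitness_make_to_left : Int × List Int := (3, [5, -2, 7])

def Spec_make_to_left (n : Int) (arr : List Int) (out : List Int) : Prop := out = make_to_left_alt n arr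
instance (n : Int) (arr : List Int) (out : List Int) : Decidable (Spec_make_to_left n arr out) := by unfold Spec_make_to_left; infer_instance

-- ===== CLAIM (what is proved, stated in full; the proofs are below) =====
def Claim_equal_make_to_left : Prop := ∀ (n : Int) (arr : List Int), Dom_make_to_left n arr → Pre_make_to_left n arr → Spec_make_to_left n arr (make_to_left n arr)

-- ===== LEMMAS AND PROOFS =====

-- stride-2 suffix sums: (pvS l)[i] = l[i] + l[i+2] + l[i+4] + ...
def pvS : List Int → List Int
  | [] => []
  | x :: t => (x + ((pvS t).tail.headD 0)) :: pvS t

theorem pvS_tail (l : List Int) : (pvS l).tail = pvS l.tail := by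
  cases l <;> rfl

-- head of pvS, with default
def pvH (l : List Int) : Int := (pvS l).headD 0

theorem pvH_cons (x : Int) (t : List Int) : pvH (x :: t) = x + pvH t.tail := by
  simp [pvH, pvS, pvS_tail]

theorem pvS_length (l : List Int) : (pvS l).length = l.length := by
  induction l with
  | nil => rfl
  | cons x t ih => simp [pvS, ih]

theorem pvS_getElem (l : List Int) (i : Nat) (h : i < (pvS l).length) :
    (pvS l)[i] = pvH (l.drop i) := by
  induction l generalizing i with
  | nil => simp [pvS] at h
  | cons x t ih =>
    cases i with
    | zero => simp [pvS, pvH, pvS_tail]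
    | succ j =>
      have hj : j < (pvS t).length := by simpa [pvS] using h
      simpa [pvS] using ih j hj

-- every-other element: eo l = [l[0], l[2], l[4], ...]
def eo : List Int → List Int
  | [] => []
  | [x] => [x]
  | x :: _ :: t => x :: eo t

theorem eo_cons (x : Int) (t : List Int) : eo (x :: t) = x :: eo t.tail := by
  cases t <;> rfl

theorem eo_length (l : List Int) : (eo l).length = (l.length + 1) / 2 := by
  induction l using eo.induct with
  | case1 => rfl
  | case2 x => simp [eo]
  | case3 x y t ih => simp [eo, List.length] at ih ⊢; omega

theorem eo_getElem (l : List Int) (k : Nat) (h : k < (eo l).length) :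
    (eo l)[k] = l.getD (2 * k) 0 := by
  induction l using eo.induct generalizing k with
  | case1 => simp [eo] at h
  | case2 x =>
    have hk : k = 0 := by simp [eo] at h; omega
    subst hk
    simp [eo]
  | case3 x y t ih =>
    cases k with
    | zero => simp [eo]
    | succ j =>
      have hj : j < (eo t).length := by simpa [eo] using h
      rw [show (eo (x :: y :: t))[j + 1] = (eo t)[j] from by simp [eo]]
      rw [ih j hj]
      show t.getD (2 * j) 0 = (x :: y :: t).getD (2 * (j + 1)) 0
      rw [show 2 * (j + 1) = 2 * j + 1 + 1 from by omega]
      simp [List.getD]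

theorem eo_sum (l : List Int) : (eo l).sum = pvH l := by
  induction l using eo.induct with
  | case1 => rfl
  | case2 x => simp [eo, pvH, pvS]
  | case3 x y t ih => simp [eo, ih, pvH_cons]

-- paint s sub k res : write sum(sub.drop j) at position s + 2*(k+j) for each j
def pvPaint (s : Nat) : List Int → Nat → List Int → List Int
  | [], _, res => res
  | x :: t, k, res => pvPaint s t (k + 1) (res.set (s + 2 * k) ((x :: t).sum))

theorem pvPaint_length (s : Nat) (sub : List Int) :
    ∀ (k : Nat) (res : List Int), (pvPaint s sub k res).length = res.length := by
  induction sub with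
  | nil => intro k res; rfl
  | cons x t ih => intro k res; simp [pvPaint, ih]

-- the inner fold of B is pvPaint
theorem fold_eq_paint (s : Nat) (sub : List Int) :
    ∀ (k0 : Nat) (res : List Int),
      ((PySem.List.enumerate sub (k0 : Int)).foldl (pvStepB (s : Int)) (res, sub.sum)).1
        = pvPaint s sub k0 res := by
  induction sub with
  | nil => intro k0 res; rfl
  | cons x t ih =>
    intro k0 res
    rw [PySem.List.enumerate_cons, List.foldl_cons]
    show ((PySem.List.enumerate t ((k0 : Int) + 1)).foldl (pvStepB (s : Int))
        (res.set ((s : Int) + 2 * (k0 : Int)).toNat ((x :: t).sum), (x :: t).sum - x)).1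
      = pvPaint s (x :: t) k0 res
    have h1 : ((s : Int) + 2 * (k0 : Int)).toNat = s + 2 * k0 := by omega
    have h2 : (x :: t).sum - x = t.sum := by rw [List.sum_cons]; ring
    have h3 : ((k0 : Int) + 1) = ((k0 + 1 : Nat) : Int) := by push_cast; ring
    rw [h1, h2, h3, ih (k0 + 1)]
    rfl

-- what one paint pass over eo (L.drop (s + 2k)) leaves at position i
theorem paint_eo_get (L : List Int) (s : Nat) (hs : s ≤ 1) :
    ∀ (c k : Nat), L.length ≤ s + 2 * k + 2 * c →
      ∀ (res : List Int) (hres : res.length = L.length),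
        ∀ (i : Nat) (hi : i < L.length),
          (pvPaint s (eo (L.drop (s + 2 * k))) k res)[i]'(by rw [pvPaint_length]; omega)
            = if s + 2 * k ≤ i ∧ (i - s) % 2 = 0 ∧ s ≤ i then pvH (L.drop i)
              else res[i]'(by omega) := by
  intro c
  induction c with
  | zero =>
    intro k hlen res hres i hi
    have hdrop : L.drop (s + 2 * k) = [] := List.drop_eq_nil_of_le (by omega)
    rw [hdrop]
    show (pvPaint s [] k res)[i]'_ = _
    rw [if_neg (by omega)]
    rfl
  | succ c ih =>
    intro k hlen res hres i hi
    by_cases hk : L.length ≤ s + 2 * k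
    · have hdrop : L.drop (s + 2 * k) = [] := List.drop_eq_nil_of_le (by omega)
      rw [hdrop]
      show (pvPaint s [] k res)[i]'_ = _
      rw [if_neg (by omega)]
      rfl
    · push_neg at hk
      obtain ⟨x, t, hxt⟩ : ∃ x t, L.drop (s + 2 * k) = x :: t := by
        cases hd : L.drop (s + 2 * k) with
        | nil => exact absurd (List.drop_eq_nil_iff.mp hd) (by omega)
        | cons x t => exact ⟨x, t, rfl⟩
      have heo : eo (L.drop (s + 2 * k)) = x :: eo t.tail := by rw [hxt, eo_cons]
      have htt : t.tail = L.drop (s + 2 * (k + 1)) := by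
        have h2 : L.drop (s + 2 * (k + 1)) = (L.drop (s + 2 * k)).drop 2 := by
          rw [List.drop_drop]; ring_nf
        rw [h2, hxt]
        cases t <;> rfl
      have hsum : (x :: eo t.tail).sum = pvH (L.drop (s + 2 * k)) := by
        rw [← eo_sum, heo]
      have hstep : pvPaint s (eo (L.drop (s + 2 * k))) k res
          = pvPaint s (eo (L.drop (s + 2 * (k + 1)))) (k + 1)
              (res.set (s + 2 * k) (pvH (L.drop (s + 2 * k)))) := by
        rw [heo]
        show pvPaint s (eo t.tail) (k + 1) (res.set (s + 2 * k) ((x :: eo t.tail).sum)) = _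
        rw [hsum, htt]
      have hres' : (res.set (s + 2 * k) (pvH (L.drop (s + 2 * k)))).length = L.length := by
        simp [hres]
      rw [List.getElem_of_eq hstep, ih (k + 1) (by omega) _ hres' i hi]
      by_cases hpaint : s + 2 * (k + 1) ≤ i ∧ (i - s) % 2 = 0 ∧ s ≤ i
      · rw [if_pos hpaint, if_pos (by omega)]
      · rw [if_neg hpaint]
        by_cases hcur : i = s + 2 * k
        · subst hcur
          rw [if_pos (by omega), List.getElem_set_self]
        · rw [if_neg (by omega)]
          rw [List.getElem_set_ne (by omega)]

-- sub computed by B's comprehension equals eo of the dropped prefix (s = 0 or 1, m ≤ len arr)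
theorem sub_eq_eo (arr : List Int) (m : Int) (hm : 0 ≤ m) (hml : m ≤ (arr.length : Int))
    (s : Nat) (hs : s ≤ 1) :
    (PySem.List.pyRange (s : Int) m 2).map (fun j => PySem.List.pyGetD arr j 0)
      = eo ((arr.take m.toNat).drop s) := by
  rw [PySem.List.pyRange_of_pos _ _ (by omega : (0:Int) < 2), List.map_map]
  apply List.ext_getElem
  · simp only [List.length_map, List.length_range, eo_length, List.length_drop,
      List.length_take]
    split_ifs with h
    · omega
    · omega
  · intro k h1 h2
    simp only [List.getElem_map, List.getElem_range, Function.comp]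
    rw [eo_getElem _ _ h2]
    have hklt : (s : Int) + 2 * (k : Int) < m := by
      simp only [List.length_map, List.length_range] at h1
      split_ifs at h1 with h
      · omega
      · omega
    have hidx : ((s : Int) + 2 * (k : Int)) = ((s + 2 * k : Nat) : Int) := by push_cast; ring
    rw [hidx, PySem.List.pyGetD_natCast]
    have hlt : s + 2 * k < arr.length := by omega
    rw [List.getD_eq_getElem _ _ hlt]
    have hlt2 : 2 * k < ((arr.take m.toNat).drop s).length := by
      simp only [List.length_drop, List.length_take]; omega
    rw [List.getD_eq_getElem _ _ hlt2]
    simp [List.getElem_drop, List.getElem_take]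

-- B computes pvS of the taken prefix
theorem B_eq_pvS (n : Int) (arr : List Int) (hpre : n ≤ (arr.length : Int)) :
    make_to_left_alt n arr = pvS (arr.take n.toNat) := by
  have hm0 : (0 : Int) ≤ max n 0 := le_max_right n 0
  have hml : max n 0 ≤ (arr.length : Int) := by omega
  have hmt : (max n 0).toNat = n.toNat := by omega
  set L := arr.take n.toNat with hL
  have hLlen : L.length = n.toNat := by simp [hL]; omega
  show pvPass arr (max n 0) ((pvPass arr (max n 0)) (List.replicate (max n 0).toNat 0) 0) 1
      = pvS L
  have hpass : ∀ (s : Nat), s ≤ 1 → ∀ res : List Int, res.length = L.length →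
      pvPass arr (max n 0) res (s : Int)
        = pvPaint s (eo (L.drop s)) 0 res := by
    intro s hs res hres
    unfold pvPass
    rw [sub_eq_eo arr (max n 0) hm0 hml s hs, hmt, ← hL]
    rw [show (0 : Int) = ((0 : Nat) : Int) from rfl, fold_eq_paint]
  have hreslen : (List.replicate (max n 0).toNat (0 : Int)).length = L.length := by
    simp [hLlen, hmt]
  have e0 := hpass 0 (by omega) (List.replicate (max n 0).toNat 0) hreslen
  simp only [Nat.cast_zero] at e0
  rw [e0]
  have hres1len : (pvPaint 0 (eo (L.drop 0)) 0 (List.replicate (max n 0).toNat 0)).length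
      = L.length := by rw [pvPaint_length]; exact hreslen
  have e1 := hpass 1 (by omega) _ hres1len
  simp only [Nat.cast_one] at e1
  rw [e1]
  apply List.ext_getElem
  · rw [pvPaint_length, pvPaint_length, hreslen, pvS_length]
  · intro i hi1 hi2
    have hiL : i < L.length := by rwa [pvS_length] at hi2
    rw [pvS_getElem _ _ hi2]
    rw [paint_eo_get L 1 (by omega) (L.length + 1) 0 (by omega) _ hres1len i hiL]
    by_cases hodd : i % 2 = 1
    · rw [if_pos (by omega)]
    · rw [if_neg (by omega)]
      rw [paint_eo_get L 0 (by omega) (L.length + 1) 0 (by omega) _ hreslen i hiL]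
      rw [if_pos (by omega)]

-- ---- A's side ----
-- the loop state after all indices ≥ j have been processed
def pvStA (arr : List Int) (n' j : Nat) : Bool × List Int × Int × Int :=
  let L := arr.take n'
  (decide (Even (n' - j)),
   List.replicate j (-1) ++ pvS (L.drop j),
   if Even (n' - j) then pvH (L.drop (j + 1)) else pvH (L.drop j),
   if Even (n' - j) then pvH (L.drop j) else pvH (L.drop (j + 1)))

theorem A_step (arr : List Int) (n' j : Nat) (hn : n' ≤ arr.length) (hj : j < n') :
    pvStepA arr (pvStA arr n' (j + 1)) (j : Int) = pvStA arr n' j := by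
  have hLlen : (arr.take n').length = n' := by simp [List.length_take]; omega
  have hjL : j < (arr.take n').length := by omega
  have hdrop : (arr.take n').drop j = (arr.take n')[j] :: (arr.take n').drop (j + 1) :=
    List.drop_eq_getElem_cons hjL
  have hget : PySem.List.pyGetD arr (j : Int) 0 = (arr.take n')[j] := by
    rw [PySem.List.pyGetD_natCast]
    rw [List.getD_eq_getElem _ _ (by omega)]
    simp [List.getElem_take]
  have hH : pvH ((arr.take n').drop j) = (arr.take n')[j] + pvH ((arr.take n').drop (j + 2)) := by
    rw [hdrop, pvH_cons, List.tail_drop]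
  have hhead : pvS ((arr.take n').drop j)
      = ((arr.take n')[j] + pvH ((arr.take n').drop (j + 2))) :: pvS ((arr.take n').drop (j + 1)) := by
    rw [hdrop, pvS, pvS_tail, List.tail_drop]
    rfl
  have hret : (List.replicate (j + 1) (-1 : Int) ++ pvS ((arr.take n').drop (j + 1))).set j
        ((arr.take n')[j] + pvH ((arr.take n').drop (j + 2)))
      = List.replicate j (-1) ++ pvS ((arr.take n').drop j) := by
    rw [show List.replicate (j + 1) (-1 : Int) = List.replicate j (-1) ++ [-1] from by
      simp [List.replicate_succ']]
    rw [List.append_assoc]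
    rw [List.set_append_right _ _ (by simp)]
    simp only [List.length_replicate, Nat.sub_self]
    rw [hhead]
    rfl
  have hpar : Even (n' - (j + 1)) ↔ ¬ Even (n' - j) := by
    simp only [Nat.even_iff]
    omega
  by_cases hp : Even (n' - (j + 1))
  · -- flag = true branch
    have hnp : ¬ Even (n' - j) := hpar.mp hp
    unfold pvStA pvStepA
    simp only [hp, hnp, if_true, if_false, decide_eq_true hp, if_pos]
    rw [hget, Int.toNat_natCast]
    have hsum : pvH ((arr.take n').drop (j + 1 + 1)) + (arr.take n')[j]
        = pvH ((arr.take n').drop j) := by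
      rw [hH]; ring_nf
    refine Prod.ext rfl (Prod.ext ?_ ?_)
    · show (List.replicate (j + 1) (-1 : Int) ++ pvS ((arr.take n').drop (j + 1))).set j
          (pvH ((arr.take n').drop (j + 1 + 1)) + (arr.take n')[j]) = _
      rw [show pvH ((arr.take n').drop (j + 1 + 1)) + (arr.take n')[j]
          = (arr.take n')[j] + pvH ((arr.take n').drop (j + 2)) from by ring_nf, hret]
    · show (pvH ((arr.take n').drop (j + 1 + 1)) + (arr.take n')[j], pvH ((arr.take n').drop (j + 1)))
          = (pvH ((arr.take n').drop j), pvH ((arr.take n').drop (j + 1)))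
      rw [hsum]
  · -- flag = false branch
    have hnp : Even (n' - j) := by
      by_contra h; exact hp (hpar.mpr h)
    unfold pvStA pvStepA
    simp only [hp, hnp, if_true, if_false, decide_eq_true hnp]
    rw [if_neg (by simp), hget, Int.toNat_natCast]
    have hsum : pvH ((arr.take n').drop (j + 1 + 1)) + (arr.take n')[j]
        = pvH ((arr.take n').drop j) := by
      rw [hH]; ring_nf
    refine Prod.ext rfl (Prod.ext ?_ ?_)
    · show (List.replicate (j + 1) (-1 : Int) ++ pvS ((arr.take n').drop (j + 1))).set j
          (pvH ((arr.take n').drop (j + 1 + 1)) + (arr.take n')[j]) = _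
      rw [show pvH ((arr.take n').drop (j + 1 + 1)) + (arr.take n')[j]
          = (arr.take n')[j] + pvH ((arr.take n').drop (j + 2)) from by ring_nf, hret]
    · show (pvH ((arr.take n').drop (j + 1)), pvH ((arr.take n').drop (j + 1 + 1)) + (arr.take n')[j])
          = (pvH ((arr.take n').drop (j + 1)), pvH ((arr.take n').drop j))
      rw [hsum]

theorem A_loop (arr : List Int) (n' : Nat) (hn : n' ≤ arr.length) :
    ∀ j, j ≤ n' →
      (PySem.List.pyRange ((j : Int) - 1) (-1) (-1)).foldl (pvStepA arr) (pvStA arr n' j)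
        = pvStA arr n' 0 := by
  intro j
  induction j with
  | zero =>
    intro _
    rw [PySem.List.pyRange_neg_one_eq_nil (by omega)]
    rfl
  | succ j ih =>
    intro hj
    rw [show (((j + 1 : Nat) : Int) - 1) = (j : Int) from by push_cast; ring]
    rw [PySem.List.pyRange_neg_one_cons (by omega)]
    rw [List.foldl_cons, A_step arr n' j hn (by omega)]
    exact ih (by omega)

theorem A_eq_pvS (n : Int) (arr : List Int) (hpre : n ≤ (arr.length : Int)) :
    make_to_left n arr = pvS (arr.take n.toNat) := by
  show ((PySem.List.pyRange (n - 1) (-1) (-1)).foldl (pvStepA arr)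
      (true, List.replicate n.toNat (-1), 0, 0)).2.1 = pvS (arr.take n.toNat)
  have hn : n.toNat ≤ arr.length := by omega
  have hinit : (true, List.replicate n.toNat (-1 : Int), (0 : Int), (0 : Int))
      = pvStA arr n.toNat n.toNat := by
    unfold pvStA
    have hdrop : (arr.take n.toNat).drop n.toNat = [] := by
      apply List.drop_eq_nil_of_le; simp
    have hdrop1 : (arr.take n.toNat).drop (n.toNat + 1) = [] := by
      apply List.drop_eq_nil_of_le; simp
    simp [hdrop, hdrop1, pvS, pvH]
  rcases (by omega : n - 1 = ((n.toNat : Int) - 1) ∨ n ≤ 0) with h | h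
  · rw [h, hinit, A_loop arr n.toNat hn n.toNat (le_refl _)]
    unfold pvStA
    simp
  · rw [PySem.List.pyRange_neg_one_eq_nil (by omega)]
    rw [hinit, show n.toNat = 0 from by omega]
    unfold pvStA
    simp

-- ===== VERDICT (by name: the statement is the Claim_ definition above) =====
theorem make_to_left_spec : Claim_equal_make_to_left := by
  intro n arr _ hpre
  unfold Spec_make_to_left
  rw [A_eq_pvS n arr hpre, B_eq_pvS n arr hpre]
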